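-- pv_equiv track=rewrite | github.com/seung-lab/seuron | slackbot/slack_bot.py | extract_corgie_cluster
-- ===== SOURCE A (Python) =====
-- def extract_corgie_cluster(msg: dict) -> str:
--     """Extracts the cluster setting for corgie.
--
--     Looks for the last use of the last word in the cluster command, and
--     return the stripped string beyond that.
--     """
--     final_cmd_word = "cluster"
--     text = msg["text"]
--
--     while True:
--         next_index = text.find(final_cmd_word)
--         if next_index == -1:
--             break
--
--         text = text[next_index+len(final_cmd_word):]
--
--     return text.strip()
-- ===== SOURCE B (Python) =====
-- def extract_corgie_cluster(msg: dict) -> str: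
--     """Extracts the cluster setting for corgie.
--
--     Single backward search for the last occurrence instead of A's
--     repeated find-and-slice loop.
--     """
--     text = msg["text"]
--     idx = text.rfind("cluster")
--     if idx == -1:
--         return text.strip()
--     return text[idx + len("cluster"):].strip()
-- ===== Notes on version B (the rewrite author's own statement) =====
-- stated objective: simpler
-- what changed: Replaces A's repeated find-and-slice while-loop with a single rfind for the last occurrence of 'cluster' followed by one slice.
import Mathlib
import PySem

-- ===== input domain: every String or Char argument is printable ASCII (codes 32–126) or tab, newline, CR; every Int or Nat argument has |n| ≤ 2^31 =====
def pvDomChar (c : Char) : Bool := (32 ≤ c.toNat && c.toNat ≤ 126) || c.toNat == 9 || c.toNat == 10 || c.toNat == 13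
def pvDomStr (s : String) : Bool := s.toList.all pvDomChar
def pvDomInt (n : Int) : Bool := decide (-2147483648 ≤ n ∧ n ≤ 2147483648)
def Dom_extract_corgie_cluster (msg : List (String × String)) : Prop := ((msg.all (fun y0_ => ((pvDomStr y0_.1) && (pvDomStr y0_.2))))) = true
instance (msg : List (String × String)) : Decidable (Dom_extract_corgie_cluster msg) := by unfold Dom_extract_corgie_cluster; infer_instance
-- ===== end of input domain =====

-- B replaces A's repeated find-and-slice while-loop by a single rfind of the last
-- occurrence of "cluster" plus one slice (objective: simpler).

-- ===== PORT A =====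
-- termination fact for A's loop, cited by name in decreasing_by
lemma extractLoopA_dec (cs : List Char)
    (h : ¬ PySem.Chars.find cs "cluster".toList = -1) :
    (PySem.List.slice cs (some (PySem.Chars.find cs "cluster".toList + 7)) none).length
      < cs.length := by
  have hge : 0 ≤ PySem.Chars.find cs "cluster".toList := by
    have := PySem.Chars.neg_one_le_find cs "cluster".toList
    omega
  have hpre := (PySem.Chars.find_spec (s := cs) (sub := "cluster".toList) hge).1
  have hlen : (PySem.Chars.find cs "cluster".toList).toNat + 7 ≤ cs.length := by
    have h2 := hpre.length_le
    rw [List.length_drop] at h2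
    have h3 : ("cluster".toList).length = 7 := by decide
    omega
  rw [PySem.List.slice_some_none, List.length_drop]
  have hcl : PySem.List.clampIdx cs.length (PySem.Chars.find cs "cluster".toList + 7)
      = (PySem.Chars.find cs "cluster".toList).toNat + 7 := by
    simp only [PySem.List.clampIdx, if_neg (by omega : ¬ PySem.Chars.find cs "cluster".toList + 7 < 0)]
    omega
  omega

-- the 'while True' loop of A: repeatedly drop everything up to and including the
-- first occurrence of "cluster" until none is found (string ops on .toList code points)
def extractLoopA (cs : List Char) : List Char :=
  if h : PySem.Chars.find cs "cluster".toList = -1 then cs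
  else extractLoopA (PySem.List.slice cs (some (PySem.Chars.find cs "cluster".toList + 7)) none)
termination_by cs.length
decreasing_by exact extractLoopA_dec cs h

def extract_corgie_cluster (msg : List (String × String)) : String :=
  match (PySem.Dict.mk msg).get? "text" with
  | none => ""  -- msg["text"] raises KeyError; excluded by Pre_
  | some text => String.ofList (PySem.Chars.strip (extractLoopA text.toList))

-- ===== PORT B =====
def extract_corgie_cluster_alt (msg : List (String × String)) : String :=
  match (PySem.Dict.mk msg).get? "text" with
  | none => ""  -- msg["text"] raises KeyError; excluded by Pre_
  | some text =>
    let idx := PySem.Chars.rfind text.toList "cluster".toList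
    if idx = -1 then String.ofList (PySem.Chars.strip text.toList)
    else String.ofList (PySem.Chars.strip (PySem.List.slice text.toList (some (idx + 7)) none))

-- ===== PRECONDITION & SPEC =====
-- Pre_ excludes only the inputs on which Python A raises KeyError: msg without a "text" key.
def Pre_extract_corgie_cluster (msg : List (String × String)) : Prop :=
  ((PySem.Dict.mk msg).get? "text").isSome = true
instance (msg : List (String × String)) : Decidable (Pre_extract_corgie_cluster msg) := by
  unfold Pre_extract_corgie_cluster; infer_instance
def pvWitness_extract_corgie_cluster : (List (String × String)) := [("text", " cluster gpu ")]

def Spec_extract_corgie_cluster (msg : List (String × String)) (out : String) : Prop := out = extract_corgie_cluster_alt msg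
instance (msg : List (String × String)) (out : String) : Decidable (Spec_extract_corgie_cluster msg out) := by unfold Spec_extract_corgie_cluster; infer_instance

-- ===== CLAIM (what is proved, stated in full; the proofs are below) =====
def Claim_equal_extract_corgie_cluster : Prop := ∀ (msg : List (String × String)), Dom_extract_corgie_cluster msg → Pre_extract_corgie_cluster msg → Spec_extract_corgie_cluster msg (extract_corgie_cluster msg)

-- ===== LEMMAS AND PROOFS =====

-- "cluster" cannot overlap itself: two occurrences are at least 7 apart
lemma cluster_no_overlap (s : List Char) (p q : Nat)
    (hp : "cluster".toList <+: s.drop p) (hq : "cluster".toList <+: s.drop q)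
    (hlt : p < q) (hcl : q < p + 7) : False := by
  obtain ⟨rest, hrest⟩ := hp
  have h1 : ("cluster".toList ++ rest).drop (q - p) = s.drop q := by
    rw [hrest, List.drop_drop]
    congr 1
    omega
  rw [← h1, List.drop_append_of_le_length (by simp; omega)] at hq
  have hpre : "cluster".toList.drop (q - p) <+: "cluster".toList := by
    rcases List.prefix_or_prefix_of_prefix (List.prefix_append _ rest) hq with h | h
    · exact h
    · have hl := h.length_le
      simp at hl
      exact absurd hl (by omega)
  set d := q - p with hdef
  have hd1 : 1 ≤ d := by omega
  have hd2 : d ≤ 6 := by omega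
  interval_cases d <;> revert hpre <;> decide

-- rfind.go returns -1 when there is no occurrence at any index ≤ j
lemma rfind_go_neg (s sub : List Char) (j : Nat)
    (h : ∀ i, i ≤ j → ¬ sub <+: s.drop i) :
    PySem.Chars.rfind.go s sub j = -1 := by
  induction j with
  | zero =>
    have h0 := h 0 le_rfl
    simp only [PySem.Chars.rfind.go, List.isPrefixOf_iff_prefix]
    rw [if_neg (by simpa using h0)]
  | succ j ih =>
    have hj := h (j+1) le_rfl
    simp only [PySem.Chars.rfind.go, List.isPrefixOf_iff_prefix]
    rw [if_neg hj]
    exact ih (fun i hi => h i (by omega))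

-- rfind.go returns the highest occurrence ≤ j
lemma rfind_go_pos (s sub : List Char) (j p : Nat)
    (hp : sub <+: s.drop p) (hpj : p ≤ j)
    (h : ∀ i, p < i → i ≤ j → ¬ sub <+: s.drop i) :
    PySem.Chars.rfind.go s sub j = (p : Int) := by
  induction j with
  | zero =>
    have hp0 : p = 0 := by omega
    subst hp0
    simp only [List.drop_zero] at hp
    simp [PySem.Chars.rfind.go, List.isPrefixOf_iff_prefix, hp]
  | succ j ih =>
    by_cases hpe : p = j + 1
    · subst hpe
      simp [PySem.Chars.rfind.go, List.isPrefixOf_iff_prefix, hp]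
    · have hnp : ¬ sub <+: s.drop (j+1) := h (j+1) (by omega) le_rfl
      simp only [PySem.Chars.rfind.go, List.isPrefixOf_iff_prefix]
      rw [if_neg hnp]
      exact ih (by omega) (fun i hi hij => h i hi (by omega))

-- full forward characterisation of rfind.go
lemma rfind_go_spec (s sub : List Char) (j : Nat) :
    (PySem.Chars.rfind.go s sub j = -1 ∧ ∀ i, i ≤ j → ¬ sub <+: s.drop i) ∨
    (∃ p : Nat, PySem.Chars.rfind.go s sub j = (p : Int) ∧ p ≤ j ∧ sub <+: s.drop p ∧
      ∀ i, p < i → i ≤ j → ¬ sub <+: s.drop i) := by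
  induction j with
  | zero =>
    by_cases h : sub <+: s.drop 0
    · refine Or.inr ⟨0, ?_, le_rfl, h, fun i hi hij => by omega⟩
      simp only [List.drop_zero] at h
      simp [PySem.Chars.rfind.go, List.isPrefixOf_iff_prefix, h]
    · refine Or.inl ⟨?_, fun i hi => ?_⟩
      · simp only [List.drop_zero] at h
        simp [PySem.Chars.rfind.go, List.isPrefixOf_iff_prefix, h]
      · have hi0 : i = 0 := by omega
        simpa [hi0] using h
    | succ j ih =>
    by_cases h : sub <+: s.drop (j+1)
    · refine Or.inr ⟨j+1, ?_, le_rfl, h, fun i hi hij => by omega⟩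
      simp [PySem.Chars.rfind.go, List.isPrefixOf_iff_prefix, h]
    · rcases ih with ⟨hv, hall⟩ | ⟨p, hv, hpj, hocc, hmax⟩
      · refine Or.inl ⟨?_, fun i hi => ?_⟩
        · simp only [PySem.Chars.rfind.go, List.isPrefixOf_iff_prefix]
          rw [if_neg h]
          exact hv
        · rcases Nat.lt_or_ge i (j+1) with hlt | hge
          · exact hall i (by omega)
          · have hie : i = j + 1 := by omega
            simpa [hie] using h
      · refine Or.inr ⟨p, ?_, by omega, hocc, fun i hi hij => ?_⟩
        · simp only [PySem.Chars.rfind.go, List.isPrefixOf_iff_prefix]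
          rw [if_neg h]
          exact hv
        · rcases Nat.lt_or_ge i (j+1) with hlt | hge
          · exact hmax i hi (by omega)
          · have hie : i = j + 1 := by omega
            simpa [hie] using h

-- slice from a nonnegative in-range index is drop
lemma slice_drop {α : Type} (cs : List α) (k : Nat) (hk : k ≤ cs.length) :
    PySem.List.slice cs (some (k : Int)) none = cs.drop k := by
  rw [PySem.List.slice_some_none]
  congr 1
  simp only [PySem.List.clampIdx, if_neg (by omega : ¬ ((k : Int) < 0))]
  omega

-- occurrences past the length are impossible for nonempty sub
lemma no_occ_past (s sub : List Char) (hsub : sub ≠ []) (i : Nat) (hi : s.length < i + sub.length) :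
    ¬ sub <+: s.drop i := by
  intro h
  have h2 := h.length_le
  rw [List.length_drop] at h2
  have h3 : 0 < sub.length := List.length_pos_iff.mpr hsub
  omega

-- A's loop lands exactly after the LAST occurrence — B's rfind expression
lemma loopA_eq_rfind (cs : List Char) :
    extractLoopA cs =
      (if PySem.Chars.rfind cs "cluster".toList = -1 then cs
       else PySem.List.slice cs (some (PySem.Chars.rfind cs "cluster".toList + 7)) none) := by
  by_cases hf : PySem.Chars.find cs "cluster".toList = -1
  · have hninf : ¬ "cluster".toList <:+: cs := (PySem.Chars.find_eq_neg_one_iff cs _).mp hf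
    have hno : ∀ i, ¬ "cluster".toList <+: cs.drop i := by
      intro i hocc
      exact hninf (((PySem.Chars.exists_prefix_drop_iff_isIn _ _).mp ⟨i, hocc⟩) |>
        (PySem.Chars.isIn_iff_infix _ _).mp)
    have hr : PySem.Chars.rfind cs "cluster".toList = -1 :=
      rfind_go_neg cs _ cs.length (fun i _ => hno i)
    rw [extractLoopA, dif_pos hf, hr, if_pos rfl]
  · -- first occurrence at ii
    have hge : 0 ≤ PySem.Chars.find cs "cluster".toList := by
      have := PySem.Chars.neg_one_le_find cs "cluster".toList
      omega
    obtain ⟨hpre, hmin⟩ := PySem.Chars.find_spec (s := cs) (sub := "cluster".toList) hge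
    set ii := (PySem.Chars.find cs "cluster".toList).toNat with hii
    have hlen : ii + 7 ≤ cs.length := by
      have h2 := hpre.length_le
      rw [List.length_drop] at h2
      have h3 : ("cluster".toList).length = 7 := by decide
      omega
    have hcast : PySem.Chars.find cs "cluster".toList + 7 = ((ii + 7 : Nat) : Int) := by omega
    have hslice : PySem.List.slice cs (some (PySem.Chars.find cs "cluster".toList + 7)) none
        = cs.drop (ii + 7) := by rw [hcast, slice_drop cs (ii + 7) hlen]
    have hstep : extractLoopA cs = extractLoopA (cs.drop (ii + 7)) := by
      rw [extractLoopA, dif_neg hf, hslice]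
    rcases rfind_go_spec (cs.drop (ii + 7)) "cluster".toList (cs.drop (ii + 7)).length with
      ⟨hv, hall⟩ | ⟨p, hv, hpj, hocc, hmax⟩
    · -- no occurrence after the first one: ii is also the last occurrence
      have hnone : ∀ i, ¬ "cluster".toList <+: (cs.drop (ii + 7)).drop i := by
        intro i
        rcases Nat.lt_or_ge (cs.drop (ii + 7)).length i with hgt | hle
        · exact no_occ_past _ _ (by decide) i (by rw [List.length_drop] at hgt ⊢; simp; omega)
        · exact hall i hle
      have hrcs : PySem.Chars.rfind cs "cluster".toList = (ii : Int) := by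
        show PySem.Chars.rfind.go cs "cluster".toList cs.length = (ii : Int)
        apply rfind_go_pos cs _ cs.length ii hpre (by omega)
        intro t hlt hle hocc
        rcases Nat.lt_or_ge t (ii + 7) with h1 | h2
        · exact cluster_no_overlap cs ii t hpre hocc hlt h1
        · have hdd : (cs.drop (ii + 7)).drop (t - (ii + 7)) = cs.drop t := by
            rw [List.drop_drop]; congr 1; omega
          exact hnone (t - (ii + 7)) (hdd ▸ hocc)
      have hrne : PySem.Chars.rfind cs "cluster".toList ≠ -1 := by omega
      have hloop' : extractLoopA (cs.drop (ii + 7)) = cs.drop (ii + 7) := by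
        have hfin : PySem.Chars.find (cs.drop (ii + 7)) "cluster".toList = -1 := by
          rw [PySem.Chars.find_eq_neg_one_iff]
          intro hinf
          rcases (PySem.Chars.exists_prefix_drop_iff_isIn _ _).mpr
            ((PySem.Chars.isIn_iff_infix _ _).mpr hinf) with ⟨i, hocc⟩
          exact hnone i hocc
        rw [extractLoopA, dif_pos hfin]
      rw [hstep, hloop', if_neg hrne, hrcs]
      have hc2 : (ii : Int) + 7 = ((ii + 7 : Nat) : Int) := by omega
      rw [hc2, slice_drop cs (ii + 7) hlen]
    · -- last occurrence in the remainder at p: cs's last occurrence is ii+7+p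
      have hv' : PySem.Chars.rfind (cs.drop (ii + 7)) "cluster".toList = (p : Int) := hv
      have hp' : p ≤ cs.length - (ii + 7) := by rwa [List.length_drop] at hpj
      have hoccs : "cluster".toList <+: cs.drop (ii + 7 + p) := by
        have hdd : (cs.drop (ii + 7)).drop p = cs.drop (ii + 7 + p) := by
          rw [List.drop_drop]
        exact hdd ▸ hocc
      have hplen : ii + 7 + p + 7 ≤ cs.length := by
        have h2 := hoccs.length_le
        rw [List.length_drop] at h2
        have h3 : ("cluster".toList).length = 7 := by decide
        omega
      have hrcs : PySem.Chars.rfind cs "cluster".toList = ((ii + 7 + p : Nat) : Int) := by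
        show PySem.Chars.rfind.go cs "cluster".toList cs.length = ((ii + 7 + p : Nat) : Int)
        apply rfind_go_pos cs _ cs.length (ii + 7 + p) hoccs (by omega)
        intro t hlt hle hocct
        have hdd : (cs.drop (ii + 7)).drop (t - (ii + 7)) = cs.drop t := by
          rw [List.drop_drop]; congr 1; omega
        exact hmax (t - (ii + 7)) (by omega) (by rw [List.length_drop]; omega) (hdd ▸ hocct)
      have hrne : PySem.Chars.rfind cs "cluster".toList ≠ -1 := by rw [hrcs]; omega
      have hrne' : PySem.Chars.rfind (cs.drop (ii + 7)) "cluster".toList ≠ -1 := by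
        rw [hv']; omega
      rw [hstep, loopA_eq_rfind (cs.drop (ii + 7)), if_neg hrne', if_neg hrne, hrcs, hv']
      have h1 : (p : Int) + 7 = ((p + 7 : Nat) : Int) := by omega
      have h2 : ((ii + 7 + p : Nat) : Int) + 7 = ((ii + 7 + p + 7 : Nat) : Int) := by omega
      rw [h1, h2, slice_drop (cs.drop (ii + 7)) (p + 7) (by rw [List.length_drop]; omega),
        slice_drop cs (ii + 7 + p + 7) hplen, List.drop_drop]
      congr 1
termination_by cs.length
decreasing_by rw [List.length_drop]; omega

-- ===== VERDICT (by name: the statement is the Claim_ definition above) =====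
theorem extract_corgie_cluster_spec : Claim_equal_extract_corgie_cluster := by
  intro msg _ hpre
  unfold Spec_extract_corgie_cluster
  unfold extract_corgie_cluster extract_corgie_cluster_alt
  cases hget : (PySem.Dict.mk msg).get? "text" with
  | none => simp [Pre_extract_corgie_cluster, hget] at hpre
  | some text =>
    simp only
    rw [loopA_eq_rfind]
    rcases eq_or_ne (PySem.Chars.rfind text.toList ['c', 'l', 'u', 's', 't', 'e', 'r']) (-1) with hr | hr <;>
      simp [hr]
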